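-- pv_equiv track=rewrite | github.com/jain272/WordCompressor | random.py | compressWord
-- ===== SOURCE A (Python) =====
-- def compressWord(word, k):
--     size = len(word) - k + 1
--     if size < 0:
--         return word
--     for i in range(0, size):
--         substr = word[i:(i + k)]
--         k_char_cons = substr_check(substr)
--         if k_char_cons:
--             word = word.replace(substr, "")
--             return compressWord(word, k)
--     return word
--
-- def substr_check(substr):
--     if len(set(substr)) == 1:
--         return True
--     return False
-- ===== SOURCE B (Python) =====
-- def first_long_run_char(word, k):
--     # single pass: char of the first run of identical characters reaching length k
--     run = 0
--     prev = None
--     for ch in word: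
--         if ch == prev:
--             run += 1
--         else:
--             run = 1
--         prev = ch
--         if run >= k:
--             return ch
--     return None
--
-- def compressWord(word, k):
--     if k <= 0:
--         return word
--     while True:
--         c = first_long_run_char(word, k)
--         if c is None:
--             return word
--         word = word.replace(c * k, "")
-- ===== Notes on version B (the rewrite author's own statement) =====
-- stated objective: faster
-- what changed: Replaces A's recursive rescan, which slices every k-window and builds a set per window to test it, with a single left-to-right run-length pass that returns the character of the first run reaching length k, driven by an iterative removal loop instead of recursion.
-- intended difference: For k < 0, Python's end-relative slicing turns word[i:i+k] into a (len(word)+k)-length window, so whenever such an all-identical window exists strictly before the end of the word A deletes all its occurrences and returns a shortened word; B returns word unchanged, the intended value since no substring of negative length exists. — e.g. on compressWord("a!", -1): A returns "!", B returns "a!"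
import Mathlib
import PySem

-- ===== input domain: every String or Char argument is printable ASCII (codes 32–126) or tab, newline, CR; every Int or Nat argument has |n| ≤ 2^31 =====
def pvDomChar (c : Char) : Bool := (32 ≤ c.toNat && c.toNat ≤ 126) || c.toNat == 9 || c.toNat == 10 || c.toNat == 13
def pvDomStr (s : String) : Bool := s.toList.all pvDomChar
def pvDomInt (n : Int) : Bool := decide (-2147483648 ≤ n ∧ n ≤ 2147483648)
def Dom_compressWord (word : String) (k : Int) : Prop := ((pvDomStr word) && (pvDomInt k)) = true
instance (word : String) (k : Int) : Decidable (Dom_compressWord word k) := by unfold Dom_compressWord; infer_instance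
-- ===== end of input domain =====

-- B replaces A's per-window set-building rescan by one run-length pass per removal round (faster);
-- on k < 0 (Python's end-relative slicing quirk in A) B intentionally returns the word unchanged — see D_ below.

-- ===== PORT A =====
-- substr_check(substr): len(set(substr)) == 1
def substrCheck (s : List Char) : Bool := (PySem.Set.ofList s).length == 1

-- the 'for i in range(0, size)' loop of A: scan i, return the first all-equal slice word[i:i+k]
def aFind (w : List Char) (k : Int) (i : Int) (fuel : Nat) : Option (List Char) :=
  match fuel with
  | 0 => none
  | f + 1 =>
    let substr := PySem.List.slice w (some i) (some (i + k))
    if substrCheck substr then some substr else aFind w k (i + 1) f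

-- fuel makes the recursion structural; fuel = len(word)+1 always suffices since each replace removes ≥ 1 char
def compressWordGo : Nat → List Char → Int → List Char
  | 0, w, _ => w
  | fuel + 1, w, k =>
    let size : Int := (w.length : Int) - k + 1
    if size < 0 then w
    else
      match aFind w k 0 size.toNat with
      | some substr => compressWordGo fuel (PySem.Chars.replace w substr []) k
      | none => w

def compressWord (word : String) (k : Int) : String :=
  String.ofList (compressWordGo (word.toList.length + 1) word.toList k)

-- ===== PORT B =====
-- first_long_run_char: one pass, char of the first run of identical chars reaching length k
def bFind (v : List Char) (k : Int) (run : Int) (prev : Option Char) : Option Char :=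
  match v with
  | [] => none
  | ch :: rest =>
    let run' := if some ch = prev then run + 1 else 1
    if k ≤ run' then some ch else bFind rest k run' (some ch)

-- the 'while True' removal loop of B (fuel as above)
def compressAltGo : Nat → List Char → Int → List Char
  | 0, w, _ => w
  | fuel + 1, w, k =>
    match bFind w k 0 none with
    | none => w
    | some c => compressAltGo fuel (PySem.Chars.replace w (List.replicate k.toNat c) []) k

def compressWord_alt (word : String) (k : Int) : String :=
  if k ≤ 0 then word
  else String.ofList (compressAltGo (word.toList.length + 1) word.toList k)

-- ===== PRECONDITION & SPEC =====
-- For k < 0, Python's end-relative slicing turns word[i:i+k] into a (len(word)+k)-length window, so whenever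
-- such an all-identical window exists strictly before the end of the word A deletes all its occurrences and
-- returns a shortened word; B returns word unchanged, the intended value since no substring of negative length exists.
def D_compressWord (word : String) (k : Int) : Prop :=
  k < 0 ∧ 1 ≤ (word.toList.length : Int) + k ∧
    ∃ c ∈ word.toList,
      PySem.Chars.isIn (List.replicate ((word.toList.length : Int) + k).toNat c)
        word.toList.dropLast = true

instance (word : String) (k : Int) : Decidable (D_compressWord word k) := by
  unfold D_compressWord; infer_instance

def Spec_compressWord (word : String) (k : Int) (out : String) : Prop :=
  ¬ D_compressWord word k → out = compressWord_alt word k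

instance (word : String) (k : Int) (out : String) : Decidable (Spec_compressWord word k out) := by
  unfold Spec_compressWord; infer_instance

def pvDiffWitness_compressWord : String × Int := ("a!", -1)
def pvDiffWitnessOut_compressWord : String × String := ("!", "a!")

-- ===== CLAIM (what is proved, stated in full; the proofs are below) =====
def Claim_unchanged_compressWord : Prop :=
  ∀ (word : String) (k : Int), Dom_compressWord word k → Spec_compressWord word k (compressWord word k)

def Claim_changed_compressWord : Prop :=
  Dom_compressWord (pvDiffWitness_compressWord.1) (pvDiffWitness_compressWord.2) ∧
  D_compressWord (pvDiffWitness_compressWord.1) (pvDiffWitness_compressWord.2) ∧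
  compressWord (pvDiffWitness_compressWord.1) (pvDiffWitness_compressWord.2) = pvDiffWitnessOut_compressWord.1 ∧
  compressWord_alt (pvDiffWitness_compressWord.1) (pvDiffWitness_compressWord.2) = pvDiffWitnessOut_compressWord.2 ∧
  pvDiffWitnessOut_compressWord.1 ≠ pvDiffWitnessOut_compressWord.2

def Claim_exact_compressWord : Prop :=
  ∀ (word : String) (k : Int), Dom_compressWord word k → D_compressWord word k →
    compressWord word k ≠ compressWord_alt word k

-- ===== LEMMAS AND PROOFS =====

-- 'the K-window of w at j is all one character' (proof-side helper)
def winB (w : List Char) (K j : Nat) : Bool :=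
  decide (j + K ≤ w.length) && ((w.drop j).take K == List.replicate K (w.getD j default))

lemma ofList_const (s : List Char) (c : Char) (h : ∀ x ∈ s, x = c) :
    PySem.Set.ofList s = if s = [] then [] else [c] := by
  induction s with
  | nil => rfl
  | cons a t ih =>
    have hac : a = c := h a (by simp)
    have ht : ∀ x ∈ t, x = c := fun x hx => h x (by simp [hx])
    rw [PySem.Set.ofList_cons, ih ht]
    subst hac
    by_cases h0 : t = [] <;> simp [h0, PySem.Set.discard]

lemma substrCheck_iff (s : List Char) :
    substrCheck s = true ↔ s ≠ [] ∧ ∃ c, s = List.replicate s.length c := by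
  constructor
  · intro h
    have hlen : (PySem.Set.ofList s).length = 1 := by
      simpa [substrCheck] using h
    obtain ⟨c, hc⟩ := List.length_eq_one_iff.mp hlen
    have hmem : ∀ x ∈ s, x = c := by
      intro x hx
      have : x ∈ PySem.Set.ofList s := (PySem.Set.mem_ofList s x).mpr hx
      simpa [hc] using this
    have hne : s ≠ [] := by
      intro h0; rw [h0] at hlen; simp [PySem.Set.ofList] at hlen
    exact ⟨hne, c, List.eq_replicate_iff.mpr ⟨rfl, hmem⟩⟩
  · rintro ⟨hne, c, hs⟩
    have hmem : ∀ x ∈ s, x = c := by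
      intro x hx; rw [hs] at hx; exact (List.eq_of_mem_replicate hx)
    have : PySem.Set.ofList s = [c] := by rw [ofList_const s c hmem]; simp [hne]
    simp [substrCheck, this]

lemma window_const_iff (w : List Char) (L i : Nat) (hL : 1 ≤ L) (hin : i + L ≤ w.length) :
    (∃ c, (w.drop i).take L = List.replicate L c) ↔
      (w.drop i).take L = List.replicate L (w.getD i default) := by
  constructor
  · rintro ⟨c, hc⟩
    have h0 : ((w.drop i).take L)[0]? = some c := by
      rw [hc, List.getElem?_replicate, if_pos (by omega : 0 < L)]
    have h0' : ((w.drop i).take L)[0]? = w[i]? := by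
      rw [List.getElem?_take_of_lt (by omega), List.getElem?_drop]
      norm_num
    have : w[i]? = some c := by rw [← h0']; exact h0
    have : w.getD i default = c := by
      rw [List.getD_eq_getElem?_getD, this]; rfl
    rw [this]; exact hc
  · intro h; exact ⟨_, h⟩

lemma winB_elim {w : List Char} {K j : Nat} (h : winB w K j = true) :
    j + K ≤ w.length ∧ (w.drop j).take K = List.replicate K (w.getD j default) := by
  simp only [winB, Bool.and_eq_true, decide_eq_true_eq, beq_iff_eq] at h
  exact h

lemma winB_intro {w : List Char} {K j : Nat} (h1 : j + K ≤ w.length)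
    (h2 : (w.drop j).take K = List.replicate K (w.getD j default)) : winB w K j = true := by
  simp only [winB, Bool.and_eq_true, decide_eq_true_eq, beq_iff_eq]
  exact ⟨h1, h2⟩

lemma substr_winB (w : List Char) (L i : Nat) (hL : 1 ≤ L) (hin : i + L ≤ w.length) :
    substrCheck ((w.drop i).take L) = true ↔ winB w L i = true := by
  have hlen : ((w.drop i).take L).length = L := by
    simp [List.length_take, List.length_drop]; omega
  rw [substrCheck_iff, hlen]
  constructor
  · rintro ⟨hne, hex⟩
    exact winB_intro hin ((window_const_iff w L i hL hin).mp hex)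
  · intro h
    refine ⟨?_, (window_const_iff w L i hL hin).mpr (winB_elim h).2⟩
    intro h0
    rw [h0] at hlen; simp at hlen; omega

lemma slice_pos (w : List Char) (j K : Nat) :
    PySem.List.slice w (some (j : Int)) (some ((j : Int) + (K : Int))) = (w.drop j).take K := by
  have : ((j : Int) + (K : Int)) = ((j + K : Nat) : Int) := by push_cast; ring
  rw [this, PySem.List.slice_natCast]
  congr 1
  omega

lemma substrCheck_nil : substrCheck ([] : List Char) = false := by decide

lemma check_neg (w : List Char) (k : Int) (hk : k < 0) (i : Nat) :
    substrCheck (PySem.List.slice w (some (i : Int)) (some ((i : Int) + k))) = true ↔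
      (1 ≤ (w.length : Int) + k ∧ (i : Int) + ((w.length : Int) + k) < (w.length : Int) ∧
        winB w ((w.length : Int) + k).toNat i = true) := by
  have ha : PySem.List.clampIdx w.length (i : Int) = min i w.length := by
    simp [PySem.List.clampIdx]
  by_cases h1 : w.length ≤ i
  · have hmin : min i w.length = w.length := by omega
    have hempty : PySem.List.slice w (some (i : Int)) (some ((i : Int) + k)) = [] := by
      simp only [PySem.List.slice, ha, hmin]
      rw [List.drop_length, List.take_nil]
    rw [hempty, substrCheck_nil]
    constructor
    · intro h; cases h
    · rintro ⟨hA, hB, -⟩; omega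
  · push_neg at h1
    have hmin : min i w.length = i := by omega
    by_cases h2 : (i : Int) + k < 0
    · by_cases h3 : (w.length : Int) + ((i : Int) + k) < 1
      · -- window clipped to nothing from the left
        have hb : PySem.List.clampIdx w.length ((i : Int) + k) = 0 := by
          simp only [PySem.List.clampIdx, if_pos h2]
          split <;> omega
        have hempty : PySem.List.slice w (some (i : Int)) (some ((i : Int) + k)) = [] := by
          simp only [PySem.List.slice, ha, hb, hmin]
          simp
        rw [hempty, substrCheck_nil]
        constructor
        · intro h; cases h
        · rintro ⟨hA, hB, -⟩; omega
      · have hb : PySem.List.clampIdx w.length ((i : Int) + k) =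
            ((w.length : Int) + (i : Int) + k).toNat := by
          simp only [PySem.List.clampIdx, if_pos h2]
          split
          · omega
          · congr 1; ring
        by_cases h4 : 1 ≤ (w.length : Int) + k
        · have hba : ((w.length : Int) + (i : Int) + k).toNat - i =
              ((w.length : Int) + k).toNat := by omega
          have hslice : PySem.List.slice w (some (i : Int)) (some ((i : Int) + k)) =
              (w.drop i).take ((w.length : Int) + k).toNat := by
            simp only [PySem.List.slice, ha, hb, hmin, hba]
          have hL1 : 1 ≤ ((w.length : Int) + k).toNat := by omega
          have hin : i + ((w.length : Int) + k).toNat ≤ w.length := by omega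
          rw [hslice, substr_winB w _ i hL1 hin]
          constructor
          · intro h; exact ⟨h4, by omega, h⟩
          · rintro ⟨-, -, h⟩; exact h
        · have hba : ((w.length : Int) + (i : Int) + k).toNat - i = 0 := by omega
          have hempty : PySem.List.slice w (some (i : Int)) (some ((i : Int) + k)) = [] := by
            simp only [PySem.List.slice, ha, hb, hmin, hba]
            simp
          rw [hempty, substrCheck_nil]
          constructor
          · intro h; cases h
          · rintro ⟨hA, -, -⟩; omega
    · -- 0 ≤ i + k < i : empty slice
      push_neg at h2
      have hb : PySem.List.clampIdx w.length ((i : Int) + k) =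
          min ((i : Int) + k).toNat w.length := by
        simp only [PySem.List.clampIdx]
        rw [if_neg (by omega)]
      have hba : min ((i : Int) + k).toNat w.length - min i w.length = 0 := by omega
      have hempty : PySem.List.slice w (some (i : Int)) (some ((i : Int) + k)) = [] := by
        simp only [PySem.List.slice, ha, hb, hba]
        simp
      rw [hempty, substrCheck_nil]
      constructor
      · intro h; cases h
      · rintro ⟨hA, hB, -⟩; omega

-- winB facts
lemma winB_false_of_len {w : List Char} {K j : Nat} (h : w.length < j + K) :
    winB w K j = false := by
  simp only [winB]
  rw [decide_eq_false (by omega : ¬ (j + K ≤ w.length))]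
  simp

lemma winB_infix {w : List Char} {K j : Nat} (h : winB w K j = true) :
    List.replicate K (w.getD j default) <:+: w := by
  obtain ⟨hle, hwin⟩ := winB_elim h
  refine ⟨w.take j, w.drop (j + K), ?_⟩
  rw [← hwin]
  calc w.take j ++ (w.drop j).take K ++ w.drop (j + K)
      = w.take (j + K) ++ w.drop (j + K) := by rw [List.take_add, List.append_assoc]
    _ = w := List.take_append_drop _ _

lemma winB_suffix_take {w : List Char} {K j : Nat} (h : winB w K j = true) :
    List.replicate K (w.getD j default) <:+ w.take (j + K) := by
  obtain ⟨hle, hwin⟩ := winB_elim h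
  exact ⟨w.take j, by rw [← hwin, List.take_add]⟩

lemma tails_iff (w : List Char) (k : Int) :
    (1 ≤ (w.length : Int) + k ∧ ∃ i < w.length,
        ((i : Int) + ((w.length : Int) + k) < (w.length : Int)) ∧
        winB w ((w.length : Int) + k).toNat i = true) ↔
    (1 ≤ (w.length : Int) + k ∧ ∃ c ∈ w,
        PySem.Chars.isIn (List.replicate ((w.length : Int) + k).toNat c)
          w.dropLast = true) := by
  constructor
  · rintro ⟨hL, i, hi, hlt, hw⟩
    refine ⟨hL, w.getD i default, ?_, ?_⟩
    · rw [List.getD_eq_getElem?_getD, List.getElem?_eq_getElem hi]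
      exact List.getElem_mem hi
    · obtain ⟨hle, hwin⟩ := winB_elim hw
      have hL1 : 1 ≤ ((w.length : Int) + k).toNat := by omega
      have hiL : i + ((w.length : Int) + k).toNat ≤ w.length - 1 := by omega
      have h1 : (w.dropLast.drop i).take ((w.length : Int) + k).toNat
          = (w.drop i).take ((w.length : Int) + k).toNat := by
        rw [List.dropLast_eq_take, List.drop_take, List.take_take]
        congr 1
        omega
      have h2 : (w.dropLast.drop i).take ((w.length : Int) + k).toNat <:+: w.dropLast :=
        ((List.take_prefix _ _).isInfix).trans ((List.drop_suffix _ _).isInfix)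
      rw [h1, hwin] at h2
      exact (PySem.Chars.isIn_iff_infix _ _).mpr h2
  · rintro ⟨hL, c, hcmem, hinf⟩
    refine ⟨hL, ?_⟩
    obtain ⟨t, t2, ht⟩ := (PySem.Chars.isIn_iff_infix _ _).mp hinf
    have hL1 : 1 ≤ ((w.length : Int) + k).toNat := by omega
    have hlen : t.length + ((w.length : Int) + k).toNat + t2.length = w.length - 1 := by
      have h3 := congrArg List.length ht
      simp at h3
      omega
    have hn2 : 2 ≤ w.length := by omega
    have hwne : w ≠ [] := by
      intro h0
      rw [h0] at hn2
      simp at hn2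
    have hw2 : w = t ++ (List.replicate ((w.length : Int) + k).toNat c ++ (t2 ++ [w.getLast hwne])) := by
      conv_lhs => rw [← List.dropLast_append_getLast hwne, ← ht]
      simp [List.append_assoc]
    have hdrop : w.drop t.length
        = List.replicate ((w.length : Int) + k).toNat c ++ (t2 ++ [w.getLast hwne]) := by
      conv_lhs => rw [hw2]
      simp
    have hwin : (w.drop t.length).take ((w.length : Int) + k).toNat
        = List.replicate ((w.length : Int) + k).toNat c := by
      rw [hdrop]
      exact List.take_left' (by simp)
    have hin : t.length + ((w.length : Int) + k).toNat ≤ w.length := by omega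
    refine ⟨t.length, by omega, by omega, ?_⟩
    exact winB_intro hin ((window_const_iff w _ t.length hL1 hin).mp ⟨c, hwin⟩)

lemma repl_suffix_winB {w : List Char} {K : Nat} {c : Char} {e : Nat}
    (hK : 1 ≤ K) (he : e ≤ w.length) (h : List.replicate K c <:+ w.take e) :
    winB w K (e - K) = true ∧ w.getD (e - K) default = c := by
  obtain ⟨t, ht⟩ := h
  have hlen : t.length + K = e := by
    have := congrArg List.length ht
    simp [List.length_take] at this
    omega
  have hKe : K ≤ e := by omega
  set j := e - K with hj
  have hjt : t.length = j := by omega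
  have hdecomp : w.take e = w.take j ++ (w.drop j).take K := by
    have : e = j + K := by omega
    rw [this, List.take_add]
  have hlen2 : (w.take j).length = j := by
    simp [List.length_take]; omega
  have heq : t = w.take j ∧ List.replicate K c = (w.drop j).take K := by
    have h' : t ++ List.replicate K c = w.take j ++ (w.drop j).take K := by
      rw [ht, hdecomp]
    exact List.append_inj h' (by omega)
  have hwin : (w.drop j).take K = List.replicate K c := heq.2.symm
  have hj? : w[j]? = some c := by
    have h0 : ((w.drop j).take K)[0]? = some c := by
      rw [hwin, List.getElem?_replicate, if_pos (by omega : 0 < K)]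
    rw [List.getElem?_take_of_lt (by omega), List.getElem?_drop] at h0
    simpa using h0
  have hgd : w.getD j default = c := by
    rw [List.getD_eq_getElem?_getD, hj?]
    rfl
  constructor
  · exact winB_intro (by omega) (by rw [hwin, hgd])
  · exact hgd

-- firstWin: least j' ≥ j whose K-window is all one character
def firstWin (w : List Char) (K j : Nat) : Option Nat :=
  if w.length < j + K then none
  else if winB w K j then some j else firstWin w K (j + 1)
termination_by w.length + 1 - j
decreasing_by omega

lemma fw_none_fuel (w : List Char) (K : Nat) (hK : 1 ≤ K) :
    ∀ fuel j, w.length + 1 - j ≤ fuel → (∀ j', j ≤ j' → winB w K j' = false) →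
      firstWin w K j = none := by
  intro fuel
  induction fuel with
  | zero =>
    intro j hj _
    rw [firstWin]
    rw [if_pos (by omega)]
  | succ f ih =>
    intro j hj h
    rw [firstWin]
    split
    · rfl
    · rw [h j le_rfl]
      simp only [Bool.false_eq_true, if_false]
      exact ih (j + 1) (by omega) (fun j' hj' => h j' (by omega))

lemma fw_none (w : List Char) (K : Nat) (hK : 1 ≤ K)
    (h : ∀ j', winB w K j' = false) : firstWin w K 0 = none :=
  fw_none_fuel w K hK (w.length + 1) 0 (by omega) (fun j' _ => h j')

lemma fw_some_fuel (w : List Char) (K : Nat) (j0 : Nat) (h0 : winB w K j0 = true) :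
    ∀ fuel j, j0 + 1 - j ≤ fuel → j ≤ j0 →
      (∀ j', j ≤ j' → j' < j0 → winB w K j' = false) → firstWin w K j = some j0 := by
  have hle : j0 + K ≤ w.length := (winB_elim h0).1
  intro fuel
  induction fuel with
  | zero => intro j hj hj0 _; omega
  | succ f ih =>
    intro j hj hj0 h
    rw [firstWin]
    rw [if_neg (by omega)]
    by_cases hjj : j = j0
    · subst hjj; rw [h0]; simp
    · rw [h j le_rfl (by omega)]
      simp only [Bool.false_eq_true, if_false]
      exact ih (j + 1) (by omega) (by omega) (fun j' hj' hj'' => h j' (by omega) hj'')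

lemma fw_winB_fuel (w : List Char) (K : Nat) {j0 : Nat} :
    ∀ fuel j, w.length + 1 - j ≤ fuel → firstWin w K j = some j0 → winB w K j0 = true := by
  intro fuel
  induction fuel with
  | zero =>
    intro j hj h
    rw [firstWin] at h
    rw [if_pos (by omega)] at h
    cases h
  | succ f ih =>
    intro j hj h
    rw [firstWin] at h
    by_cases h1 : w.length < j + K
    · rw [if_pos h1] at h; cases h
    · rw [if_neg h1] at h
      by_cases h2 : winB w K j = true
      · rw [h2] at h; simp at h; rw [← h]; exact h2
      · rw [Bool.not_eq_true] at h2
        rw [h2] at h; simp at h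
        exact ih (j + 1) (by omega) h

lemma fw_winB (w : List Char) (K : Nat) {j0 : Nat} (h : firstWin w K 0 = some j0) :
    winB w K j0 = true :=
  fw_winB_fuel w K (w.length + 1) 0 (by omega) h

-- A's scan computes the first all-one-character window
lemma aFind_eq (w : List Char) (K : Nat) (hK : 1 ≤ K) :
    ∀ (fuel j : Nat), j + fuel + K = w.length + 1 →
      aFind w (K : Int) (j : Int) fuel =
        (firstWin w K j).map (fun j0 => List.replicate K (w.getD j0 default)) := by
  intro fuel
  induction fuel with
  | zero =>
    intro j hj
    rw [firstWin]
    rw [if_pos (by omega)]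
    rfl
  | succ f ih =>
    intro j hj
    have hjK : j + K ≤ w.length := by omega
    simp only [aFind]
    rw [slice_pos]
    by_cases hw : winB w K j = true
    · rw [if_pos ((substr_winB w K j hK hjK).mpr hw)]
      rw [firstWin, if_neg (by omega), if_pos hw, Option.map_some]
      obtain ⟨-, hwin⟩ := winB_elim hw
      rw [hwin]
    · rw [if_neg (fun hc => hw ((substr_winB w K j hK hjK).mp hc))]
      have hcast : (j : Int) + 1 = ((j + 1 : Nat) : Int) := by push_cast; ring
      have hfw : firstWin w K j = firstWin w K (j + 1) := by
        rw [firstWin]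
        rw [if_neg (show ¬ (w.length < j + K) by omega), if_neg hw]
      rw [hcast, ih (j + 1) (by omega), ← hfw]

lemma aFind_none_zero (w : List Char) : ∀ fuel (i : Int), aFind w 0 i fuel = none := by
  intro fuel
  induction fuel with
  | zero => intro i; rfl
  | succ f ih =>
    intro i
    simp only [aFind]
    have : PySem.List.slice w (some i) (some (i + 0)) = [] := by
      simp only [PySem.List.slice, add_zero]
      simp
    rw [this, substrCheck_nil]
    simp only [Bool.false_eq_true, if_false]
    exact ih (i + 1)

lemma aFind_none_neg (w : List Char) (k : Int) (hk : k < 0)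
    (hnd : ¬ (1 ≤ (w.length : Int) + k ∧
      ∃ i < w.length, ((i : Int) + ((w.length : Int) + k) < (w.length : Int)) ∧
        winB w ((w.length : Int) + k).toNat i = true)) :
    ∀ fuel (i : Nat), aFind w k (i : Int) fuel = none := by
  intro fuel
  induction fuel with
  | zero => intro i; rfl
  | succ f ih =>
    intro i
    simp only [aFind]
    have hfalse : substrCheck (PySem.List.slice w (some (i : Int)) (some ((i : Int) + k))) = false := by
      by_contra h
      rw [Bool.not_eq_false] at h
      obtain ⟨h1, h2, h3⟩ := (check_neg w k hk i).mp h
      exact hnd ⟨h1, i, by omega, h2, h3⟩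
    rw [hfalse]
    simp only [Bool.false_eq_true, if_false]
    have hcast : (i : Int) + 1 = ((i + 1 : Nat) : Int) := by push_cast; ring
    rw [hcast]
    exact ih (i + 1)

lemma aFind_some_of (w : List Char) (k : Int) :
    ∀ fuel (j d : Nat), d < fuel →
      substrCheck (PySem.List.slice w (some ((j + d : Nat) : Int)) (some (((j + d : Nat) : Int) + k))) = true →
      ∃ s, aFind w k (j : Int) fuel = some s := by
  intro fuel
  induction fuel with
  | zero => intro j d hd _; omega
  | succ f ih =>
    intro j d hd hcheck
    simp only [aFind]
    by_cases h : substrCheck (PySem.List.slice w (some (j : Int)) (some ((j : Int) + k))) = true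
    · rw [h]; exact ⟨_, rfl⟩
    · rw [Bool.not_eq_true] at h
      rw [h]
      simp only [Bool.false_eq_true, if_false]
      have hd0 : d ≠ 0 := by
        intro h0
        rw [h0] at hcheck
        simp at hcheck
        rw [hcheck] at h
        cases h
      have hcast : (j : Int) + 1 = ((j + 1 : Nat) : Int) := by push_cast; ring
      rw [hcast]
      refine ih (j + 1) (d - 1) (by omega) ?_
      have : j + 1 + (d - 1) = j + d := by omega
      rw [this]
      exact hcheck

lemma slice_infix (w : List Char) (a b : Int) :
    PySem.List.slice w (some a) (some b) <:+: w := by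
  simp only [PySem.List.slice]
  exact ((List.take_prefix _ _).isInfix).trans ((List.drop_suffix _ _).isInfix)

lemma aFind_some_infix (w : List Char) (k : Int) :
    ∀ fuel (i : Int) s, aFind w k i fuel = some s → s ≠ [] ∧ s <:+: w := by
  intro fuel
  induction fuel with
  | zero => intro i s h; cases h
  | succ f ih =>
    intro i s h
    simp only [aFind] at h
    by_cases hc : substrCheck (PySem.List.slice w (some i) (some (i + k))) = true
    · rw [hc] at h
      simp at h
      rw [← h]
      exact ⟨((substrCheck_iff _).mp hc).1, slice_infix w i (i + k)⟩
    · rw [Bool.not_eq_true] at hc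
      rw [hc] at h
      simp only [Bool.false_eq_true, if_false] at h
      exact ih (i + 1) s h

-- replace with "" removes at least one occurrence: the result is strictly shorter
lemma go_len_le (old : List Char) :
    ∀ fuel (l acc : List Char),
      (PySem.Chars.replace.go old [] fuel l acc).length ≤ acc.length + l.length := by
  intro fuel
  induction fuel with
  | zero =>
    intro l acc
    simp [PySem.Chars.replace.go]
  | succ f ih =>
    intro l acc
    cases l with
    | nil => simp [PySem.Chars.replace.go]
    | cons c t =>
      rw [PySem.Chars.replace.go]
      split
      · have := ih (List.drop old.length (c :: t)) acc
        simp only [List.reverse_nil, List.nil_append] at this ⊢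
        calc (PySem.Chars.replace.go old [] f (List.drop old.length (c :: t)) acc).length
            ≤ acc.length + (List.drop old.length (c :: t)).length := this
          _ ≤ acc.length + (c :: t).length := by
              simp [List.length_drop]
      · have := ih t (c :: acc)
        simp at this ⊢
        omega

lemma go_len_lt (old : List Char) (hne : old ≠ []) :
    ∀ fuel (l acc : List Char), old <:+: l → l.length ≤ fuel →
      (PySem.Chars.replace.go old [] fuel l acc).length < acc.length + l.length := by
  have hop : 1 ≤ old.length := by
    cases old with
    | nil => exact absurd rfl hne
    | cons a t => simp
  intro fuel
  induction fuel with
  | zero =>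
    intro l acc hinf hlen
    have hl : l = [] := by
      cases l with
      | nil => rfl
      | cons a t => simp at hlen
    subst hl
    have : old.length ≤ 0 := by simpa using hinf.length_le
    omega
  | succ f ih =>
    intro l acc hinf hlen
    cases l with
    | nil =>
      have : old.length ≤ 0 := by simpa using hinf.length_le
      omega
    | cons c t =>
      rw [PySem.Chars.replace.go]
      split
      · rename_i hpre
        have hpre' : old <+: (c :: t) := List.isPrefixOf_iff_prefix.mp hpre
        have hople : old.length ≤ (c :: t).length := hpre'.length_le
        have := go_len_le old f (List.drop old.length (c :: t)) acc
        simp only [List.reverse_nil, List.nil_append] at this ⊢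
        calc (PySem.Chars.replace.go old [] f (List.drop old.length (c :: t)) acc).length
            ≤ acc.length + (List.drop old.length (c :: t)).length := this
          _ < acc.length + (c :: t).length := by
              simp [List.length_drop] at hople ⊢
              omega
      · rename_i hpre
        have hpre' : ¬ old <+: (c :: t) := fun h => by
          rw [List.isPrefixOf_iff_prefix.mpr h] at hpre; exact hpre rfl
        have hinf' : old <:+: t := by
          rcases List.infix_cons_iff.mp hinf with h | h
          · exact absurd h hpre'
          · exact h
        have := ih t (c :: acc) hinf' (by simpa using Nat.lt_succ_iff.mp (by simpa using hlen))
        simp at this ⊢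
        omega

lemma replace_len_lt {w old : List Char} (hne : old ≠ []) (h : old <:+: w) :
    (PySem.Chars.replace w old []).length < w.length := by
  rw [PySem.Chars.replace]
  rw [if_neg (by simp [hne])]
  have := go_len_lt old hne w.length w [] h le_rfl
  simpa using this

-- B's scan computes the same first window (invariant: run = length of the maximal
-- one-character suffix of the processed prefix u, prev = its last character)
lemma suffix_repl_last {l : List Char} {K : Nat} (hK : 1 ≤ K) {c d : Char}
    (h : List.replicate K c <:+ l ++ [d]) : c = d := by
  obtain ⟨t, ht⟩ := h
  obtain ⟨K', rfl⟩ : ∃ K', K = K' + 1 := ⟨K - 1, by omega⟩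
  rw [List.replicate_succ', ← List.append_assoc] at ht
  have h2 := congrArg List.getLast? ht
  rw [List.getLast?_concat, List.getLast?_concat] at h2
  simpa using h2

lemma bFind_eq (w : List Char) (K : Nat) (hK : 1 ≤ K) :
    ∀ (v u : List Char) (r : Nat) (c? : Option Char),
      w = u ++ v → r < K →
      ((c? = none ∧ u = [] ∧ r = 0) ∨
        (∃ p, c? = some p ∧ u.getLast? = some p ∧ List.replicate r p <:+ u ∧
          (∀ s, List.replicate s p <:+ u → s ≤ r))) →
      (∀ j, j + K ≤ u.length → winB w K j = false) →
      bFind v (K : Int) (r : Int) c? = (firstWin w K 0).map (fun j0 => w.getD j0 default) := by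
  intro v
  induction v with
  | nil =>
    intro u r c? hw hr hinv hwin
    have : firstWin w K 0 = none := by
      refine fw_none w K hK (fun j' => ?_)
      by_cases hj : j' + K ≤ w.length
      · refine hwin j' ?_
        have : w.length = u.length := by rw [hw]; simp
        omega
      · exact winB_false_of_len (by omega)
    rw [this]
    rfl
  | cons ch rest ih =>
    intro u r c? hw hr hinv hwin
    simp only [bFind]
    have hw' : w = (u ++ [ch]) ++ rest := by rw [hw]; simp
    have htake1 : w.take (u.length + 1) = u ++ [ch] := by
      have h1 : u.length + 1 = (u ++ [ch]).length := by simp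
      rw [hw', h1, List.take_left]
    -- compute the new run length R' and the facts about it
    have hstep : ∃ R' : Nat,
        (if some ch = c? then (r : Int) + 1 else 1) = (R' : Int) ∧ R' ≤ K ∧ 1 ≤ R' ∧
        List.replicate R' ch <:+ u ++ [ch] ∧
        (∀ s, List.replicate s ch <:+ u ++ [ch] → s ≤ R') := by
      rcases hinv with ⟨hc, hu, hr0⟩ | ⟨p, hc, hlast, hsuf, hmax⟩
      · subst hc; subst hu; subst hr0
        refine ⟨1, by simp, hK, le_rfl, ⟨[], by simp⟩, ?_⟩
        intro s hs
        have := hs.length_le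
        simpa using this
      · subst hc
        by_cases hch : ch = p
        · subst hch
          refine ⟨r + 1, by rw [if_pos rfl]; push_cast; ring, by omega, by omega, ?_, ?_⟩
          · obtain ⟨t, ht⟩ := hsuf
            exact ⟨t, by rw [List.replicate_succ', ← List.append_assoc, ht]⟩
          · intro s hs
            cases s with
            | zero => omega
            | succ s' =>
              obtain ⟨t, ht⟩ := hs
              rw [List.replicate_succ', ← List.append_assoc] at ht
              have ht' : t ++ List.replicate s' ch = u := by
                have := congrArg List.dropLast ht
                simpa [List.dropLast_concat] using this
              have := hmax s' ⟨t, ht'⟩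
              omega
        · refine ⟨1, by rw [if_neg (by simp [hch])]; norm_num, hK, le_rfl, ⟨u, by simp⟩, ?_⟩
          intro s hs
          by_contra hcon
          push_neg at hcon
          obtain ⟨s', rfl⟩ : ∃ s', s = s' + 1 := ⟨s - 1, by omega⟩
          obtain ⟨t, ht⟩ := hs
          rw [List.replicate_succ', ← List.append_assoc] at ht
          have ht' : t ++ List.replicate s' ch = u := by
            have := congrArg List.dropLast ht
            simpa [List.dropLast_concat] using this
          obtain ⟨s'', rfl⟩ : ∃ s'', s' = s'' + 1 := ⟨s' - 1, by omega⟩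
          have hlast' : u.getLast? = some ch := by
            rw [← ht', List.replicate_succ', ← List.append_assoc]
            exact List.getLast?_concat
          rw [hlast] at hlast'
          simp at hlast'
          exact hch hlast'.symm
    obtain ⟨R', hR'eq, hR'K, hR'1, hsuf', hmax'⟩ := hstep
    rw [hR'eq]
    by_cases htrig : (K : Int) ≤ (R' : Int)
    · rw [if_pos htrig]
      have hRK : R' = K := by omega
      rw [hRK] at hsuf' hmax'
      -- the window just completed is the first one
      have he : u.length + 1 ≤ w.length := by rw [hw]; simp
      have hrepl : List.replicate K ch <:+ w.take (u.length + 1) := by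
        rw [htake1]; exact hsuf'
      obtain ⟨hwinb, hgd⟩ := repl_suffix_winB hK he hrepl
      have hRlen : K ≤ u.length + 1 := by
        have := hsuf'.length_le
        simpa using this
      have hfw : firstWin w K 0 = some (u.length + 1 - K) := by
        refine fw_some_fuel w K (u.length + 1 - K) hwinb (u.length + 2) 0 (by omega) (by omega) ?_
        intro j' _ hj'
        exact hwin j' (by omega)
      rw [hfw, Option.map_some, hgd]
    · rw [if_neg htrig]
      refine ih (u ++ [ch]) R' (some ch) hw' (by omega) ?_ ?_
      · exact Or.inr ⟨ch, rfl, List.getLast?_concat, hsuf', hmax'⟩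
      · intro j hj
        simp only [List.length_append, List.length_cons, List.length_nil] at hj
        by_cases hj2 : j + K ≤ u.length
        · exact hwin j hj2
        · have hje : j + K = u.length + 1 := by omega
          by_contra hcon
          rw [Bool.not_eq_false] at hcon
          have hsuf2 := winB_suffix_take hcon
          rw [hje, htake1] at hsuf2
          have hcd : w.getD j default = ch := suffix_repl_last hK hsuf2
          rw [hcd] at hsuf2
          have := hmax' K hsuf2
          omega

lemma bFind_eq0 (w : List Char) (K : Nat) (hK : 1 ≤ K) :
    bFind w (K : Int) 0 none = (firstWin w K 0).map (fun j0 => w.getD j0 default) := by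
  have h0 : ((0 : Nat) : Int) = (0 : Int) := by norm_num
  rw [← h0]
  refine bFind_eq w K hK w [] 0 none (by simp) (by omega) (Or.inl ⟨rfl, rfl, rfl⟩) ?_
  intro j hj
  simp at hj
  omega

-- the whole compression never lengthens the word
lemma go_len_le' : ∀ fuel (w : List Char) (k : Int),
    (compressWordGo fuel w k).length ≤ w.length := by
  intro fuel
  induction fuel with
  | zero => intro w k; simp [compressWordGo]
  | succ f ih =>
    intro w k
    simp only [compressWordGo]
    split
    · exact le_rfl
    · rcases hfind : aFind w k 0 ((w.length : Int) - k + 1).toNat with _ | s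
      · simp
      · simp only []
        obtain ⟨hne, hinf⟩ := aFind_some_infix w k _ 0 s hfind
        have hlt := replace_len_lt hne hinf
        exact le_trans (ih _ k) (le_of_lt hlt)

-- main step equality for k ≥ 1
lemma go_eq : ∀ fuel (w : List Char) (k : Int), w.length < fuel → 1 ≤ k →
    compressWordGo fuel w k = compressAltGo fuel w k := by
  intro fuel
  induction fuel with
  | zero => intro w k h _; omega
  | succ f ih =>
    intro w k hf hk
    have hkK : (k.toNat : Int) = k := Int.toNat_of_nonneg (by omega)
    have hK : 1 ≤ k.toNat := by omega
    have hbf : bFind w k 0 none =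
        (firstWin w k.toNat 0).map (fun j0 => w.getD j0 default) := by
      rw [← hkK]; exact bFind_eq0 w k.toNat hK
    simp only [compressWordGo, compressAltGo]
    by_cases hsize : (w.length : Int) - k + 1 < 0
    · rw [if_pos hsize]
      have hfw : firstWin w k.toNat 0 = none := by
        rw [firstWin]
        rw [if_pos (by omega)]
      rw [hbf, hfw]
      rfl
    · rw [if_neg hsize]
      have haf := aFind_eq w k.toNat hK ((w.length : Int) - k + 1).toNat 0 (by omega)
      rw [hkK, Nat.cast_zero] at haf
      rw [haf, hbf]
      cases hfw : firstWin w k.toNat 0 with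
      | none => rfl
      | some j0 =>
        simp only [Option.map_some]
        show compressWordGo f (PySem.Chars.replace w (List.replicate k.toNat (w.getD j0 default)) []) k
            = compressAltGo f (PySem.Chars.replace w (List.replicate k.toNat (w.getD j0 default)) []) k
        have hwinb := fw_winB w k.toNat hfw
        have hinf := winB_infix hwinb
        have hne : List.replicate k.toNat (w.getD j0 default) ≠ [] := by
          simp [List.replicate_eq_nil_iff]
          omega
        have hlt := replace_len_lt hne hinf
        exact ih _ k (by omega) hk

-- For k ≤ 0 and outside D_, A's scan finds nothing
lemma goA_id_nonpos (w : List Char) (k : Int) (hk : k ≤ 0)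
    (hnd : ¬ (k < 0 ∧ 1 ≤ (w.length : Int) + k ∧
      ∃ c ∈ w, PySem.Chars.isIn (List.replicate ((w.length : Int) + k).toNat c)
        w.dropLast = true)) :
    ∀ fuel, compressWordGo fuel w k = w := by
  intro fuel
  cases fuel with
  | zero => rfl
  | succ f =>
    simp only [compressWordGo]
    rw [if_neg (by omega)]
    rcases eq_or_lt_of_le hk with hk0 | hkneg
    · rw [hk0, aFind_none_zero w _ 0]
    · have hnd' : ¬ (1 ≤ (w.length : Int) + k ∧
          ∃ i < w.length, ((i : Int) + ((w.length : Int) + k) < (w.length : Int)) ∧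
            winB w ((w.length : Int) + k).toNat i = true) := by
        intro h
        exact hnd ⟨hkneg, (tails_iff w k).mp h⟩
      have h0 : ((0 : Nat) : Int) = (0 : Int) := by norm_num
      rw [← h0, aFind_none_neg w k hkneg hnd' _ 0]

-- ===== VERDICT (by name: the statement is the Claim_ definition above) =====
theorem compressWord_spec : Claim_unchanged_compressWord := by
  intro word k _hdom
  unfold Spec_compressWord
  intro hnd
  unfold compressWord compressWord_alt
  by_cases hk : k ≤ 0
  · rw [if_pos hk]
    have hnd' := hnd
    unfold D_compressWord at hnd'
    rw [goA_id_nonpos word.toList k hk hnd' (word.toList.length + 1)]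
    simp
  · rw [if_neg hk]
    push_neg at hk
    rw [go_eq (word.toList.length + 1) word.toList k (by omega) (by omega)]

set_option maxRecDepth 20000 in
theorem compressWord_changed : Claim_changed_compressWord := by
  unfold Claim_changed_compressWord
  refine ⟨by decide, ?_, by decide, by decide, by decide⟩
  unfold D_compressWord
  exact ⟨by decide, by decide, 'a', by decide, by decide⟩

theorem compressWord_tight : Claim_exact_compressWord := by
  intro word k _hdom hD
  obtain ⟨hk, hL0, c, hcmem, hinf⟩ := hD
  unfold compressWord compressWord_alt
  rw [if_pos (le_of_lt hk)]
  intro heq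
  set w := word.toList with hw
  obtain ⟨hL, i, hin, hlt, hwinb⟩ := (tails_iff w k).mpr ⟨hL0, c, hcmem, hinf⟩
  have htl : compressWordGo (w.length + 1) w k = w := by
    have h2 := congrArg String.toList heq
    simpa using h2
  -- A's first pass fires at (some index ≤) i, so A's result is strictly shorter than w
  have hcheck : substrCheck (PySem.List.slice w (some ((0 + i : Nat) : Int))
      (some (((0 + i : Nat) : Int) + k))) = true := by
    have h0i : (0 + i : Nat) = i := by omega
    rw [h0i]
    exact (check_neg w k hk i).mpr ⟨hL, hlt, hwinb⟩
  have hdlt : i < ((w.length : Int) - k + 1).toNat := by omega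
  obtain ⟨s, hs⟩ := aFind_some_of w k ((w.length : Int) - k + 1).toNat 0 i hdlt hcheck
  rw [Nat.cast_zero] at hs
  have hgo : compressWordGo (w.length + 1) w k =
      compressWordGo w.length (PySem.Chars.replace w s []) k := by
    simp only [compressWordGo]
    rw [if_neg (by omega), hs]
  obtain ⟨hne, hinf⟩ := aFind_some_infix w k _ 0 s hs
  have hshort := replace_len_lt hne hinf
  have hfinal : (compressWordGo (w.length + 1) w k).length < w.length := by
    rw [hgo]
    exact lt_of_le_of_lt (go_len_le' w.length _ k) hshort
  rw [htl] at hfinal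
  omega
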